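-- pv_equiv track=rewrite | github.com/JR-WU/CADA_test | Code/Main_opt.py | check_current_nodes_suit_for_current_req
-- ===== SOURCE A (Python) =====
-- def check_current_nodes_suit_for_current_req(nodes, usage):
--     temp_nodes = list(nodes.values())
--     usage_backup = sorted(usage, reverse=True)
--     can_satisfy = True
--
--     for u in usage_backup:
--         possible = False
--         for i in range(len(temp_nodes)):
--             if temp_nodes[i] >= u:
--                 temp_nodes[i] -= u
--                 possible = True
--                 break
--         if not possible:
--             can_satisfy = False
--             break
--     return can_satisfy
-- ===== SOURCE B (Python) =====
-- # Same first-fit-decreasing simulation, but the leftmost node with capacity >= u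
-- # is located through a max segment tree instead of a linear scan (alternative data structure).
--
-- def _build(xs):
--     if len(xs) == 1:
--         return ('leaf', xs[0])
--     k = len(xs) // 2
--     l = _build(xs[:k])
--     r = _build(xs[k:])
--     return ('node', max(l[1], r[1]), l, r)
--
-- def _serve(t, u):
--     # place u into the leftmost leaf with value >= u; None if no leaf fits
--     if t[0] == 'leaf':
--         return ('leaf', t[1] - u) if t[1] >= u else None
--     _, m, l, r = t
--     if l[1] >= u:
--         l2 = _serve(l, u)
--         return ('node', max(l2[1], r[1]), l2, r)
--     if r[1] >= u:
--         r2 = _serve(r, u)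
--         return ('node', max(l[1], r2[1]), l, r2)
--     return None
--
-- def check_current_nodes_suit_for_current_req(nodes, usage):
--     caps = list(nodes.values())
--     if not caps:
--         return not usage
--     t = _build(caps)
--     for u in sorted(usage, reverse=True):
--         t = _serve(t, u)
--         if t is None:
--             return False
--     return True
-- ===== Notes on version B (the rewrite author's own statement) =====
-- stated objective: alternative
-- what changed: The inner linear scan for the leftmost node with capacity >= u is replaced by a max segment tree over the capacities, queried and updated in O(log n) per usage item.
import Mathlib
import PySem

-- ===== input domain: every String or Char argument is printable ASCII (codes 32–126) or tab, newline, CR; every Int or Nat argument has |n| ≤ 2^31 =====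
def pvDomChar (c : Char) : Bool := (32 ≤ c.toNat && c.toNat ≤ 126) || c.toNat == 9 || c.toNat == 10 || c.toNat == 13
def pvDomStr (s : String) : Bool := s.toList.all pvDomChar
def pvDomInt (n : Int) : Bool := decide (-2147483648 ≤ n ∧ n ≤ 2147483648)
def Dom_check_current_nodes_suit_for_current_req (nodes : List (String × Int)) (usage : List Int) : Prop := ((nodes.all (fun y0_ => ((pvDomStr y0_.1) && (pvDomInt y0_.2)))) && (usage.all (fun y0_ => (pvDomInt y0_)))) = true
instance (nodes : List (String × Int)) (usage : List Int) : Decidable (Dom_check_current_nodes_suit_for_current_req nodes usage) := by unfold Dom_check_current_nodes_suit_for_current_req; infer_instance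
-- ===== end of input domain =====

-- B replaces A's inner linear first-fit scan by a max segment tree over the node
-- capacities (the leftmost leaf with capacity ≥ u is found and updated along one
-- root-leaf path); same first-fit-decreasing result, an alternative data structure.

-- ===== PORT A =====
-- inner loop: 'for i in range(len(temp_nodes)): if temp_nodes[i] >= u: temp_nodes[i] -= u; possible = True; break'
def pvAInner : List Int → Int → List Int × Bool
  | [], _ => ([], false)
  | x :: t, u =>
    if u ≤ x then ((x - u) :: t, true)
    else ((x :: (pvAInner t u).1), (pvAInner t u).2)

-- outer loop: 'for u in usage_backup: …; if not possible: can_satisfy = False; break'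
def pvALoop : List Int → List Int → Bool
  | _, [] => true
  | temp, u :: rest =>
    if (pvAInner temp u).2 then pvALoop (pvAInner temp u).1 rest else false

def check_current_nodes_suit_for_current_req (nodes : List (String × Int)) (usage : List Int) : Bool :=
  let temp_nodes := (PySem.Dict.ofList nodes).values
  let usage_backup := PySem.List.sorted usage (fun x => x) true
  pvALoop temp_nodes usage_backup

-- ===== PORT B =====
-- tuple ('leaf', c) / ('node', m, l, r) of Source B
inductive PVTree : Type
  | leaf : Int → PVTree
  | node : Int → PVTree → PVTree → PVTree
deriving Repr, DecidableEq

-- t[1] of Source B: the stored max of the subtree's capacities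
def PVTree.top : PVTree → Int
  | .leaf c => c
  | .node m _ _ => m

-- _serve of Source B (in Source B the recursive call after a successful guard cannot return
-- None; the 'none => none' arms make the Lean transcription total at those spots)
def pvServe : PVTree → Int → Option PVTree
  | .leaf c, u => if u ≤ c then some (.leaf (c - u)) else none
  | .node _ l r, u =>
    if u ≤ l.top then
      match pvServe l u with
      | some l2 => some (.node (max l2.top r.top) l2 r)
      | none => none
    else if u ≤ r.top then
      match pvServe r u with
      | some r2 => some (.node (max l.top r2.top) l r2)
      | none => none
    else none

-- _build of Source B
def pvBuild : List Int → PVTree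
  | [] => .leaf 0   -- unreachable: Source B only builds from a nonempty capacity list
  | [x] => .leaf x
  | x :: y :: rest =>
    let k := (x :: y :: rest).length / 2
    let l := pvBuild ((x :: y :: rest).take k)
    let r := pvBuild ((x :: y :: rest).drop k)
    .node (max l.top r.top) l r
termination_by xs => xs.length
decreasing_by
  · simp; omega
  · simp; omega

-- 'for u in sorted(usage, reverse=True): t = _serve(t, u); if t is None: return False'
def pvBLoop : PVTree → List Int → Bool
  | _, [] => true
  | t, u :: rest =>
    match pvServe t u with
    | none => false
    | some t' => pvBLoop t' rest

def check_current_nodes_suit_for_current_req_alt (nodes : List (String × Int)) (usage : List Int) : Bool :=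
  let caps := (PySem.Dict.ofList nodes).values
  if caps.isEmpty then usage.isEmpty
  else pvBLoop (pvBuild caps) (PySem.List.sorted usage (fun x => x) true)

-- ===== PRECONDITION & SPEC =====
def Spec_check_current_nodes_suit_for_current_req (nodes : List (String × Int)) (usage : List Int) (out : Bool) : Prop := out = check_current_nodes_suit_for_current_req_alt nodes usage
instance (nodes : List (String × Int)) (usage : List Int) (out : Bool) : Decidable (Spec_check_current_nodes_suit_for_current_req nodes usage out) := by unfold Spec_check_current_nodes_suit_for_current_req; infer_instance

-- ===== CLAIM (what is proved, stated in full; the proofs are below) =====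
def Claim_equal_check_current_nodes_suit_for_current_req : Prop := ∀ (nodes : List (String × Int)) (usage : List Int), Dom_check_current_nodes_suit_for_current_req nodes usage → Spec_check_current_nodes_suit_for_current_req nodes usage (check_current_nodes_suit_for_current_req nodes usage)

-- ===== LEMMAS AND PROOFS =====

-- the multiset of capacities a tree stores, left to right
def PVTree.toList : PVTree → List Int
  | .leaf c => [c]
  | .node _ l r => l.toList ++ r.toList

-- well-formedness: every stored max is the max of its children's tops
def PVTree.WF : PVTree → Prop
  | .leaf _ => True
  | .node m l r => m = max l.top r.top ∧ l.WF ∧ r.WF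

theorem pvAInner_append (a b : List Int) (u : Int) :
    pvAInner (a ++ b) u =
      if (pvAInner a u).2 then ((pvAInner a u).1 ++ b, true)
      else (a ++ (pvAInner b u).1, (pvAInner b u).2) := by
  induction a with
  | nil => simp [pvAInner]
  | cons x t ih =>
    simp only [List.cons_append, pvAInner]
    by_cases h : u ≤ x
    · simp [h]
    · simp [h, ih]
      split_ifs <;> simp

theorem pvServe_spec (u : Int) : ∀ t : PVTree, t.WF →
    (u ≤ t.top → ∃ t', pvServe t u = some t' ∧ t'.WF ∧
        pvAInner t.toList u = (t'.toList, true)) ∧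
    (t.top < u → pvServe t u = none ∧ (pvAInner t.toList u).2 = false) := by
  intro t
  induction t with
  | leaf c =>
    intro _
    constructor
    · intro h
      have h' : u ≤ c := by simpa [PVTree.top] using h
      exact ⟨.leaf (c - u), by simp [pvServe, h'], trivial,
        by simp [pvAInner, PVTree.toList, h']⟩
    · intro h
      have h' : ¬ u ≤ c := not_le.mpr (by simpa [PVTree.top] using h)
      simp [pvServe, pvAInner, PVTree.toList, h']
  | node m l r ihl ihr =>
    rintro ⟨hm, hl, hr⟩
    have IHL := ihl hl
    have IHR := ihr hr
    constructor
    · intro h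
      have hmax : u ≤ max l.top r.top := by rw [← hm]; simpa [PVTree.top] using h
      by_cases hL : u ≤ l.top
      · obtain ⟨l2, hs, hwf, hin⟩ := IHL.1 hL
        refine ⟨.node (max l2.top r.top) l2 r, ?_, ⟨rfl, hwf, hr⟩, ?_⟩
        · simp [pvServe, hL, hs]
        · simp [PVTree.toList, pvAInner_append, hin]
      · have hLlt : l.top < u := not_le.mp hL
        obtain ⟨hsl, hfl⟩ := IHL.2 hLlt
        have hR : u ≤ r.top := (le_max_iff.mp hmax).resolve_left hL
        obtain ⟨r2, hs, hwf, hin⟩ := IHR.1 hR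
        refine ⟨.node (max l.top r2.top) l r2, ?_, ⟨rfl, hl, hwf⟩, ?_⟩
        · simp [pvServe, hL, hR, hs]
        · simp [PVTree.toList, pvAInner_append, hfl, hin]
    · intro h
      have hmax : max l.top r.top < u := by rw [← hm]; simpa [PVTree.top] using h
      have hL : l.top < u := lt_of_le_of_lt (le_max_left _ _) hmax
      have hR : r.top < u := lt_of_le_of_lt (le_max_right _ _) hmax
      obtain ⟨hsl, hfl⟩ := IHL.2 hL
      obtain ⟨hsr, hfr⟩ := IHR.2 hR
      constructor
      · simp [pvServe, not_le.mpr hL, not_le.mpr hR]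
      · simp [PVTree.toList, pvAInner_append, hfl, hfr]

theorem pvBuild_spec : ∀ xs : List Int, xs ≠ [] →
    (pvBuild xs).WF ∧ (pvBuild xs).toList = xs := by
  intro xs
  induction xs using pvBuild.induct with
  | case1 => intro h; exact absurd rfl h
  | case2 x => intro _; simp [pvBuild, PVTree.WF, PVTree.toList]
  | case3 x y rest k ihl ihr =>
    intro _
    have hlen : (x :: y :: rest).length = rest.length + 2 := by simp
    have hk1 : 1 ≤ k := by omega
    have hklt : k < (x :: y :: rest).length := by omega
    have htake : (x :: y :: rest).take k ≠ [] := by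
      simp [List.take_eq_nil_iff]; omega
    have hdrop : (x :: y :: rest).drop k ≠ [] := by
      simp [List.drop_eq_nil_iff]; omega
    obtain ⟨hwl, htl⟩ := ihl htake
    obtain ⟨hwr, htr⟩ := ihr hdrop
    rw [pvBuild]
    refine ⟨⟨rfl, hwl, hwr⟩, ?_⟩
    simp only [PVTree.toList]
    rw [htl, htr, List.take_append_drop]

theorem pvLoop_eq (us : List Int) : ∀ t : PVTree, t.WF →
    pvALoop t.toList us = pvBLoop t us := by
  induction us with
  | nil => intro t _; simp [pvALoop, pvBLoop]
  | cons u rest ih =>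
    intro t hwf
    by_cases h : u ≤ t.top
    · obtain ⟨t', hs, hwf', hin⟩ := (pvServe_spec u t hwf).1 h
      simp [pvALoop, pvBLoop, hs, hin, ih t' hwf']
    · obtain ⟨hs, hf⟩ := (pvServe_spec u t hwf).2 (not_le.mp h)
      simp [pvALoop, pvBLoop, hs, hf]

theorem pvALoop_nil (us : List Int) : pvALoop [] us = us.isEmpty := by
  cases us <;> simp [pvALoop, pvAInner]

-- ===== VERDICT (by name: the statement is the Claim_ definition above) =====
theorem check_current_nodes_suit_for_current_req_spec : Claim_equal_check_current_nodes_suit_for_current_req := by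
  intro nodes usage _
  unfold Spec_check_current_nodes_suit_for_current_req
  unfold check_current_nodes_suit_for_current_req check_current_nodes_suit_for_current_req_alt
  simp only []
  by_cases hc : (PySem.Dict.ofList nodes).values = []
  · rw [hc]
    simp only [List.isEmpty_nil]
    rw [pvALoop_nil]
    cases h : PySem.List.sorted usage (fun x => x) true with
    | nil =>
      have : usage = [] := (PySem.List.sorted_eq_nil_iff _ _ _).mp h
      simp [this]
    | cons a t =>
      have hne : usage ≠ [] := by
        intro he
        have h0 := (PySem.List.sorted_eq_nil_iff usage (fun x => x) true).mpr he
        rw [h] at h0; cases h0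
      simp [hne]
  · obtain ⟨hwf, htl⟩ := pvBuild_spec _ hc
    rw [if_neg (by simpa [List.isEmpty_iff] using hc)]
    have hmain := pvLoop_eq (PySem.List.sorted usage (fun x => x) true) _ hwf
    rw [htl] at hmain
    exact hmain
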